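-- pv_equiv track=rewrite | github.com/siwargrati/angular-flask-PFA | back-end/similarity/similarity.py | treatString
-- ===== SOURCE A (Python) =====
-- def treatString(s):
--   s2 = s.replace("_", " ")
--   s2 = s2.replace("-", " ")
--   s2 = s2.replace(".", " ")
--   s2 = s2.replace("/", " ")
--   s2 = s2.replace("_", " ")
--   s2 = s2.lower()
--
--   for i in range(len(s2) - 1):
--     if s2[i].islower() and s2[i + 1].isupper():
--       s2 = s2[0:i + 1] + " " + s2[i + 1:]
--   return s2
-- ===== SOURCE B (Python) =====
-- def treatString(s):
--   out = []
--   for ch in s: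
--     if ch in "_-./":
--       out.append(" ")
--     else:
--       out.append(ch)
--   return "".join(out).lower()
-- ===== Notes on version B (the rewrite author's own statement) =====
-- stated objective: simpler
-- what changed: One per-character pass that maps each separator to a space, joined and lowercased once, instead of five full replace passes followed by a dead camelCase-splitting loop (dead because the string is already lowercased).
import Mathlib
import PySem

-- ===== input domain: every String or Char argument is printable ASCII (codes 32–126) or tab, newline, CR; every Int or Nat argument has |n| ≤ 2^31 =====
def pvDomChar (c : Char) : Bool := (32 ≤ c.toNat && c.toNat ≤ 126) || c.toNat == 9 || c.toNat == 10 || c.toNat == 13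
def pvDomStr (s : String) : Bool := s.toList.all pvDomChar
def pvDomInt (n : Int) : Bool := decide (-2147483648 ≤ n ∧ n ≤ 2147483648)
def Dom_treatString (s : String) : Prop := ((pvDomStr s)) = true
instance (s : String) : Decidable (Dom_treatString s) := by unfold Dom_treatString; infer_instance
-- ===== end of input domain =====

-- B replaces A's five full-string replace passes and dead camelCase loop by one per-character pass
-- (separator → space) joined and lowercased once (objective: simpler).


-- ===== PORT A =====
-- A's camelCase-splitting for-loop, over the precomputed index range
def tsLoopA (idxs : List Int) (cs : List Char) : List Char :=
  idxs.foldl (fun s2 i =>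
    match PySem.List.pyGet? s2 i, PySem.List.pyGet? s2 (i + 1) with
    | some a, some b =>
        if PySem.Chars.islower a && PySem.Chars.isupper b then
          PySem.List.slice s2 (some 0) (some (i + 1)) ++ [' '] ++
            PySem.List.slice s2 (some (i + 1)) none
        else s2
    | _, _ => s2) cs

def treatString (s : String) : String :=
  let s2 := PySem.Str.replace s "_" " "
  let s2 := PySem.Str.replace s2 "-" " "
  let s2 := PySem.Str.replace s2 "." " "
  let s2 := PySem.Str.replace s2 "/" " "
  let s2 := PySem.Str.replace s2 "_" " "
  let s2 := PySem.Str.lower s2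
  String.ofList (tsLoopA (PySem.List.pyRange 0 (PySem.Str.len s2 - 1) 1) s2.toList)

-- ===== PORT B =====
def treatString_alt (s : String) : String :=
  let out := s.toList.foldl
    (fun acc ch => if PySem.Chars.isIn [ch] "_-./".toList then acc ++ [' '] else acc ++ [ch]) []
  PySem.Str.lower (String.ofList out)

-- ===== PRECONDITION & SPEC =====
def Spec_treatString (s : String) (out : String) : Prop := out = treatString_alt s
instance (s : String) (out : String) : Decidable (Spec_treatString s out) := by unfold Spec_treatString; infer_instance

-- ===== CLAIM (what is proved, stated in full; the proofs are below) =====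
def Claim_equal_treatString : Prop := ∀ (s : String), Dom_treatString s → Spec_treatString s (treatString s)

-- ===== LEMMAS AND PROOFS =====

-- replacing a single character by a single character is a per-character map
lemma replace_go_single (c d : Char) : ∀ (fuel : Nat) (l acc : List Char), l.length ≤ fuel →
    PySem.Chars.replace.go [c] [d] fuel l acc
      = acc.reverse ++ l.map (fun x => if x = c then d else x) := by
  intro fuel
  induction fuel with
  | zero => intro l acc h; simp at h; subst h; simp [PySem.Chars.replace.go]
  | succ n ih =>
    intro l acc h
    cases l with
    | nil => simp [PySem.Chars.replace.go]
    | cons x t =>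
      simp only [PySem.Chars.replace.go]
      by_cases hx : x = c
      · subst hx
        simp [List.isPrefixOf, ih t _ (by simpa using Nat.lt_succ_iff.mp (by simpa using h))]
      · simp [List.isPrefixOf, hx, Ne.symm hx, ih t _ (by simpa using Nat.lt_succ_iff.mp (by simpa using h))]

lemma replace_single (c d : Char) (s : List Char) :
    PySem.Chars.replace s [c] [d] = s.map (fun x => if x = c then d else x) := by
  simpa [PySem.Chars.replace] using replace_go_single c d s.length s []

lemma isupper_lowerChar (c : Char) : PySem.Chars.isupper (PySem.Chars.lowerChar c) = false := by
  simp only [PySem.Chars.lowerChar]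
  split
  · rename_i h
    simp only [PySem.Chars.isupper, Bool.and_eq_true, decide_eq_true_eq, Char.le_def,
      UInt32.le_iff_toNat_le] at h
    have hA : 65 ≤ c.toNat := by exact_mod_cast h.1
    have hZ : c.toNat ≤ 90 := by exact_mod_cast h.2
    have hvalid : Nat.isValidChar (c.toNat + 32) := Or.inl (by omega)
    have hv : (Char.ofNat (c.toNat + 32)).toNat = c.toNat + 32 := by
      simp [Char.toNat_ofNat, hvalid]
    simp only [PySem.Chars.isupper, Bool.and_eq_false_iff, decide_eq_false_iff_not, Char.le_def,
      UInt32.le_iff_toNat_le]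
    right
    intro hcontra
    have : (Char.ofNat (c.toNat + 32)).toNat ≤ 90 := by exact_mod_cast hcontra
    omega
  · rename_i h
    simpa using h

-- A's for-loop never changes a string that contains no uppercase character
lemma tsLoopA_id (idxs : List Int) (cs : List Char)
    (h : ∀ c ∈ cs, PySem.Chars.isupper c = false) : tsLoopA idxs cs = cs := by
  induction idxs with
  | nil => rfl
  | cons i is ih =>
    have hstep : (match PySem.List.pyGet? cs i, PySem.List.pyGet? cs (i + 1) with
        | some a, some b =>
            if PySem.Chars.islower a && PySem.Chars.isupper b then
              PySem.List.slice cs (some 0) (some (i + 1)) ++ [' '] ++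
                PySem.List.slice cs (some (i + 1)) none
            else cs
        | _, _ => cs) = cs := by
      cases h1 : PySem.List.pyGet? cs i with
      | none => simp
      | some a =>
        cases h2 : PySem.List.pyGet? cs (i + 1) with
        | none => simp
        | some b =>
          have hb := h b (PySem.List.mem_of_pyGet?_eq_some cs h2)
          simp [hb]
    unfold tsLoopA at ih ⊢
    rw [List.foldl_cons]
    rw [show (match PySem.List.pyGet? cs i, PySem.List.pyGet? cs (i + 1) with
        | some a, some b =>
            if PySem.Chars.islower a && PySem.Chars.isupper b then
              PySem.List.slice cs (some 0) (some (i + 1)) ++ [' '] ++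
                PySem.List.slice cs (some (i + 1)) none
            else cs
        | _, _ => cs) = cs from hstep]
    exact ih

lemma sep_toList : "_-./".toList = ['_', '-', '.', '/'] := by decide

-- the five single-char replaces compose to B's one-pass separator map
lemma chain_eq_sep (x : Char) :
    (fun y => if y = '_' then ' ' else y)
      ((fun y => if y = '/' then ' ' else y)
        ((fun y => if y = '.' then ' ' else y)
          ((fun y => if y = '-' then ' ' else y)
            ((fun y => if y = '_' then ' ' else y) x))))
      = (if PySem.Chars.isIn [x] "_-./".toList then ' ' else x) := by
  have hmem : PySem.Chars.isIn [x] "_-./".toList = true ↔ x ∈ ['_', '-', '.', '/'] := by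
    rw [sep_toList, PySem.Chars.isIn_iff_infix, List.singleton_infix_iff]
  by_cases h1 : x = '_'
  · subst h1; decide
  by_cases h2 : x = '-'
  · subst h2; decide
  by_cases h3 : x = '.'
  · subst h3; decide
  by_cases h4 : x = '/'
  · subst h4; decide
  have hno : PySem.Chars.isIn [x] "_-./".toList = false := by
    rw [Bool.eq_false_iff]
    intro hc
    have hm := hmem.mp hc
    simp only [List.mem_cons, List.not_mem_nil, or_false] at hm
    tauto
  rw [hno]
  simp [h1, h2, h3, h4]

-- B's accumulator loop is a per-character map (p kept abstract so simp cannot unfold the literal)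
lemma foldl_sep_map (p : Char → Bool) (cs : List Char) :
    cs.foldl (fun acc ch => if p ch then acc ++ [' '] else acc ++ [ch]) ([] : List Char)
      = cs.map (fun ch => if p ch then ' ' else ch) := by
  induction cs using List.reverseRecOn with
  | nil => rfl
  | append_singleton t x ih =>
      simp only [List.foldl_append, List.foldl_cons, List.foldl_nil, ih, List.map_append]
      split <;> simp_all

lemma replace_str (t : String) (lit : String) (c : Char) (hc : lit.toList = [c]) :
    (PySem.Str.replace t lit " ").toList = t.toList.map (fun x => if x = c then ' ' else x) := by
  rw [PySem.Str.toList_replace, hc]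
  have h2 : (" " : String).toList = [' '] := by decide
  rw [h2]
  exact replace_single c ' ' t.toList

theorem treatString_spec_aux (s : String) : treatString s = treatString_alt s := by
  apply String.toList_inj.mp
  simp only [treatString, treatString_alt]
  rw [foldl_sep_map (fun ch => PySem.Chars.isIn [ch] "_-./".toList) s.toList]
  have hlow : ∀ (u : String), (PySem.Str.lower u).toList = u.toList.map PySem.Chars.lowerChar := by
    intro u; rw [PySem.Str.toList_lower]; rfl
  rw [tsLoopA_id]
  · rw [String.toList_ofList, hlow, hlow,
      replace_str _ "_" '_' (by decide), replace_str _ "/" '/' (by decide),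
      replace_str _ "." '.' (by decide), replace_str _ "-" '-' (by decide),
      replace_str _ "_" '_' (by decide)]
    simp only [String.toList_ofList, List.map_map]
    apply List.map_congr_left
    intro x _
    simp only [Function.comp_apply]
    exact congrArg PySem.Chars.lowerChar (chain_eq_sep x)
  · intro c hc
    rw [hlow] at hc
    obtain ⟨y, _, rfl⟩ := List.mem_map.mp hc
    exact isupper_lowerChar y

-- ===== VERDICT (by name: the statement is the Claim_ definition above) =====
theorem treatString_spec : Claim_equal_treatString := by
  intro s _
  unfold Spec_treatString
  exact treatString_spec_aux s
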